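-- pv_equiv track=rewrite | github.com/anocaj/coding-fluency | micro_patterns/loop_patterns.py | index_iteration_exercise
-- ===== SOURCE A (Python) =====
-- def index_iteration_exercise(arr):
--     """
--     Practice iterating over array indices using range(len(arr)) pattern.
--     This pattern is useful when you need the index for calculations or comparisons.
--
--     Args:
--         arr: List of elements to iterate over
--
--     Returns:
--         list: New list with elements at even indices doubled
--
--     Example:
--         >>> index_iteration_exercise([1, 2, 3, 4, 5])
--         [2, 2, 6, 4, 10]
--     """
--     result = []
--     for i in range(len(arr)):
--         if i % 2 == 0:  # Even index
--             result.append(arr[i] * 2)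
--         else:  # Odd index
--             result.append(arr[i])
--     return result
-- ===== SOURCE B (Python) =====
-- def index_iteration_exercise(arr):
--     result = list(arr)
--     result[::2] = [x * 2 for x in result[::2]]
--     return result
-- ===== Notes on version B (the rewrite author's own statement) =====
-- stated objective: idiomatic
-- what changed: Replaces the indexed loop with a per-index parity branch by a whole-list copy plus a strided slice assignment that doubles the even-index slice in one step.
import Mathlib
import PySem

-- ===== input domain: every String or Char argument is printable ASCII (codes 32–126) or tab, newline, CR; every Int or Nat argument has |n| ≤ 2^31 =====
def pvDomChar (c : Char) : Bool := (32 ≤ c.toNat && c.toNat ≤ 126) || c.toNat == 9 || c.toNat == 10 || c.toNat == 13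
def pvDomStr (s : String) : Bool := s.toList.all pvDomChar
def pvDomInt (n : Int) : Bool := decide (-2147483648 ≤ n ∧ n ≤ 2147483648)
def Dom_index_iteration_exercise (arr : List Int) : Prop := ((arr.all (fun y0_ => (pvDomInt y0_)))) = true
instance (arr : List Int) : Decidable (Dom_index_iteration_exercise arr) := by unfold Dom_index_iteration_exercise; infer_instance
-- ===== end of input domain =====

-- B copies the list and doubles the even-index strided slice in one slice assignment instead of
-- A's per-index parity branch; equal output on all inputs (objective: more idiomatic, same cost).

-- ===== PORT A =====
-- result = []; for i in range(len(arr)): append arr[i]*2 if i even else arr[i]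
def index_iteration_exercise (arr : List Int) : List Int :=
  (List.range arr.length).foldl
    (fun result i =>
      if i % 2 == 0 then result ++ [PySem.List.pyGetD arr (Int.ofNat i) 0 * 2]
      else result ++ [PySem.List.pyGetD arr (Int.ofNat i) 0])
    []

-- ===== PORT B =====
-- result[::2] (read) ported by hand as the every-second-element recursion (exact for a
-- whole-list step-2 slice; PySem has no step-2 slice lemma).
def pvStride2 : List Int → List Int
  | [] => []
  | [x] => [x]
  | x :: _ :: rest => x :: pvStride2 rest

-- result[::2] = ds : slice assignment with step 2, ported by hand (exact for step 2 and
-- a replacement list of exactly the slice's length, which is what B supplies).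
def pvSetStride2 (xs ds : List Int) : List Int :=
  match xs, ds with
  | [], _ => []
  | x :: xs', [] => x :: xs'
  | _ :: xs', d :: ds' =>
    match xs' with
    | [] => [d]
    | y :: ys => d :: y :: pvSetStride2 ys ds'

def index_iteration_exercise_alt (arr : List Int) : List Int :=
  let result := arr                               -- result = list(arr)
  let evens := pvStride2 result                   -- result[::2]
  pvSetStride2 result (evens.map (fun x => x * 2))

-- ===== PRECONDITION & SPEC =====
def Spec_index_iteration_exercise (arr : List Int) (out : List Int) : Prop := out = index_iteration_exercise_alt arr
instance (arr : List Int) (out : List Int) : Decidable (Spec_index_iteration_exercise arr out) := by unfold Spec_index_iteration_exercise; infer_instance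

-- ===== CLAIM (what is proved, stated in full; the proofs are below) =====
def Claim_equal_index_iteration_exercise : Prop := ∀ (arr : List Int), Dom_index_iteration_exercise arr → Spec_index_iteration_exercise arr (index_iteration_exercise arr)

-- ===== LEMMAS AND PROOFS =====

-- Common intermediate form: element at position k gets doubled iff k + offset is even.
def pvSpecGo (k : Nat) : List Int → List Int
  | [] => []
  | x :: xs => (if k % 2 == 0 then x * 2 else x) :: pvSpecGo (k + 1) xs

theorem pvSpecGo_mod (xs : List Int) : ∀ k, pvSpecGo (k + 2) xs = pvSpecGo k xs := by
  induction xs with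
  | nil => intro k; rfl
  | cons x xs ih =>
    intro k
    simp [pvSpecGo, Nat.add_mod_right, ih (k + 1)]

theorem pvFoldl_append (g : Nat → Int) :
    ∀ (l : List Nat) (pre : List Int),
      l.foldl (fun r i => if i % 2 == 0 then r ++ [g i * 2] else r ++ [g i]) pre
        = pre ++ l.map (fun i => if i % 2 == 0 then g i * 2 else g i) := by
  intro l
  induction l with
  | nil => simp
  | cons a l ih =>
    intro pre
    simp only [List.foldl_cons, List.map_cons, ih]
    split <;> simp

theorem pvMapRange (xs : List Int) :
    ∀ k, (List.range xs.length).map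
        (fun i => if (i + k) % 2 == 0 then xs.getD i 0 * 2 else xs.getD i 0)
      = pvSpecGo k xs := by
  induction xs with
  | nil => intro k; rfl
  | cons x xs ih =>
    intro k
    rw [List.length_cons, List.range_succ_eq_map, List.map_cons, List.map_map]
    simp only [pvSpecGo, Nat.zero_add, List.getD_cons_zero]
    congr 1
    have := ih (k + 1)
    rw [← this]
    apply List.map_congr_left
    intro i _
    simp [Function.comp, Nat.succ_add, Nat.add_assoc]

theorem pvA_eq_specGo (arr : List Int) : index_iteration_exercise arr = pvSpecGo 0 arr := by
  unfold index_iteration_exercise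
  simp only [Int.ofNat_eq_natCast, PySem.List.pyGetD_natCast]
  rw [pvFoldl_append (fun i => arr.getD i 0) (List.range arr.length) []]
  simpa using pvMapRange arr 0

theorem pv_two_step {P : List Int → Prop} (h0 : P []) (h1 : ∀ x, P [x])
    (h2 : ∀ x y xs, P xs → P (x :: y :: xs)) : ∀ xs, P xs
  | [] => h0
  | [x] => h1 x
  | x :: y :: rest => h2 x y rest (pv_two_step h0 h1 h2 rest)

theorem pvB_eq_specGo : ∀ arr, index_iteration_exercise_alt arr = pvSpecGo 0 arr := by
  apply pv_two_step
  · rfl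
  · intro x; rfl
  · intro x y xs ih
    have h2 := pvSpecGo_mod xs 0
    simp only [index_iteration_exercise_alt, pvStride2, List.map_cons, pvSetStride2] at *
    simp [pvSpecGo, ih, h2]

-- ===== VERDICT (by name: the statement is the Claim_ definition above) =====
theorem index_iteration_exercise_spec : Claim_equal_index_iteration_exercise := by
  intro arr _
  unfold Spec_index_iteration_exercise
  rw [pvA_eq_specGo, pvB_eq_specGo]
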